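-- pv_equiv track=rewrite | github.com/ryanchaiyakul/dismech-jax | examples/slinky/experiment_data/extract_data_new.py | segment_into_fixed_chunks
-- ===== SOURCE A (Python) =====
-- def segment_into_fixed_chunks(
--     n_samples,
--     chunk_len=80,
--     stride=None,
--     drop_last=True,
-- ):
--     """
--     Split a long time series into fixed-length chunks.
--
--     Parameters
--     ----------
--     n_samples : int
--         Total number of samples.
--     chunk_len : int
--         Number of raw samples per chunk.
--     stride : int or None
--         Step between chunk starts. If None, uses non-overlapping chunks.
--     drop_last : bool
--         Whether to discard the final incomplete chunk.
--
--     Returns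
--     -------
--     segments : list of (start, end)
--     """
--     if chunk_len < 2:
--         raise ValueError("chunk_len must be at least 2")
--
--     if stride is None:
--         stride = chunk_len
--
--     if stride < 1:
--         raise ValueError("stride must be at least 1")
--
--     segments = []
--     start = 0
--     while start < n_samples:
--         end = start + chunk_len
--
--         if end <= n_samples:
--             segments.append((start, end))
--         else:
--             if not drop_last and (n_samples - start) >= 2:
--                 segments.append((start, n_samples))
--             break
--
--         start += stride
--
--     if len(segments) == 0:
--         raise ValueError(
--             f"No chunks created. n_samples={n_samples}, "
--             f"chunk_len={chunk_len}, stride={stride}"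
--         )
--
--     return segments
-- ===== SOURCE B (Python) =====
-- def segment_into_fixed_chunks(
--     n_samples,
--     chunk_len=80,
--     stride=None,
--     drop_last=True,
-- ):
--     if chunk_len < 2:
--         raise ValueError("chunk_len must be at least 2")
--
--     if stride is None:
--         stride = chunk_len
--
--     if stride < 1:
--         raise ValueError("stride must be at least 1")
--
--     segments = []
--     if chunk_len <= n_samples:
--         # jump straight to the last full chunk via floor division,
--         # decide the tail first, then walk backwards and reverse
--         last = ((n_samples - chunk_len) // stride) * stride
--         t = last + stride
--         if t < n_samples and not drop_last and n_samples - t >= 2: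
--             segments.append((t, n_samples))
--         s = last
--         while s >= 0:
--             segments.append((s, s + chunk_len))
--             s -= stride
--         segments.reverse()
--     else:
--         if not drop_last and n_samples >= 2:
--             segments.append((0, n_samples))
--
--     if len(segments) == 0:
--         raise ValueError(
--             f"No chunks created. n_samples={n_samples}, "
--             f"chunk_len={chunk_len}, stride={stride}"
--         )
--
--     return segments
-- ===== Notes on version B (the rewrite author's own statement) =====
-- stated objective: alternative
-- what changed: B replaces A's forward cursor scan by a back-to-front construction: it jumps directly to the last full-chunk start via floor division ((n_samples-chunk_len)//stride)*stride, appends the optional tail chunk first, walks the starts backwards by stride, and reverses the list at the end; the n_samples<chunk_len case is handled arithmetically without any loop.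
import Mathlib
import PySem

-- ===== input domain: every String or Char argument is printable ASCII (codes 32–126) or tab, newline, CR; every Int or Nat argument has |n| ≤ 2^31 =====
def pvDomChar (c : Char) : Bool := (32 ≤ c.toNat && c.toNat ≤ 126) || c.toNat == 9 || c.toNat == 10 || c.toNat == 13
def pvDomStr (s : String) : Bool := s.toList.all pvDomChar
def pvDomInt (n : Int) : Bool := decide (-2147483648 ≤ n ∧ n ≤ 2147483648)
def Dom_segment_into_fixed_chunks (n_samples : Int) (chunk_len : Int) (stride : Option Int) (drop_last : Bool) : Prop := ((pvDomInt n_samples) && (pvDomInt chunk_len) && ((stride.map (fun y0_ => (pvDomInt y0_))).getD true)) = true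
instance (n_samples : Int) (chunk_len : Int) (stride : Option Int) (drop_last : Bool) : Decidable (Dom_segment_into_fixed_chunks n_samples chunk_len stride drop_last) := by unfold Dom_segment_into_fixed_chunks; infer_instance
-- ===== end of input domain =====

-- B builds the segment list back-to-front: it jumps to the last full-chunk start by floor
-- division, decides the tail chunk first, walks the starts backwards and reverses at the end
-- (objective: alternative). Equality of the RETURN value is proved on Pre_ (the inputs where
-- the Python A returns instead of raising ValueError).

-- ===== PORT A =====
-- A's while-loop; fuel makes the recursion total (inside Pre_ the fuel passed is sufficient).
def pvLoopA (n cl st : Int) (drop : Bool) : Nat → Int → List (Int × Int)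
  | 0, _ => []
  | fuel + 1, start =>
    if start < n then
      if start + cl ≤ n then
        (start, start + cl) :: pvLoopA n cl st drop fuel (start + st)
      else
        if drop = false ∧ 2 ≤ n - start then [(start, n)] else []
    else []

def segment_into_fixed_chunks (n_samples : Int) (chunk_len : Int) (stride : Option Int) (drop_last : Bool) : List (Int × Int) :=
  if chunk_len < 2 then []            -- Python: raise ValueError (excluded by Pre_)
  else
    let st := stride.getD chunk_len
    if st < 1 then []                 -- Python: raise ValueError (excluded by Pre_)
    else
      -- while start < n_samples: … (empty result = Python's final raise, excluded by Pre_)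
      pvLoopA n_samples chunk_len st drop_last (n_samples.toNat + 1) 0

-- ===== PORT B =====
-- B's backward walk 'while s >= 0: append (s, s+chunk_len); s -= stride', built in the order
-- appended (descending); fuel makes the recursion total (the fuel passed is sufficient).
def pvLoopB (cl st : Int) : Nat → Int → List (Int × Int)
  | 0, _ => []
  | fuel + 1, s =>
    if 0 ≤ s then (s, s + cl) :: pvLoopB cl st fuel (s - st) else []

def segment_into_fixed_chunks_alt (n_samples : Int) (chunk_len : Int) (stride : Option Int) (drop_last : Bool) : List (Int × Int) :=
  if chunk_len < 2 then []            -- Python: raise ValueError (excluded by Pre_)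
  else
    let st := stride.getD chunk_len
    if st < 1 then []                 -- Python: raise ValueError (excluded by Pre_)
    else
      if chunk_len ≤ n_samples then
        let last := (PySem.Int.floordiv (n_samples - chunk_len) st) * st
        let t := last + st
        let tail := if t < n_samples ∧ drop_last = false ∧ 2 ≤ n_samples - t
                    then [(t, n_samples)] else []
        (tail ++ pvLoopB chunk_len st (last.toNat + 1) last).reverse
      else
        if drop_last = false ∧ 2 ≤ n_samples then [(0, n_samples)]
        else []                       -- empty result = Python's final raise, excluded by Pre_

-- ===== PRECONDITION & SPEC =====
-- Pre_ excludes exactly the inputs on which the Python A raises ValueError: chunk_len < 2,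
-- stride < 1, and the 'No chunks created' case (no full chunk fits and no admissible tail).
def Pre_segment_into_fixed_chunks (n_samples : Int) (chunk_len : Int) (stride : Option Int) (drop_last : Bool) : Prop :=
  2 ≤ chunk_len ∧ 1 ≤ stride.getD chunk_len ∧
    (chunk_len ≤ n_samples ∨ (drop_last = false ∧ 2 ≤ n_samples))
instance (n_samples : Int) (chunk_len : Int) (stride : Option Int) (drop_last : Bool) : Decidable (Pre_segment_into_fixed_chunks n_samples chunk_len stride drop_last) := by unfold Pre_segment_into_fixed_chunks; infer_instance

def pvWitness_segment_into_fixed_chunks : Int × Int × Option Int × Bool := (10, 3, some 2, true)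

def Spec_segment_into_fixed_chunks (n_samples : Int) (chunk_len : Int) (stride : Option Int) (drop_last : Bool) (out : List (Int × Int)) : Prop := out = segment_into_fixed_chunks_alt n_samples chunk_len stride drop_last
instance (n_samples : Int) (chunk_len : Int) (stride : Option Int) (drop_last : Bool) (out : List (Int × Int)) : Decidable (Spec_segment_into_fixed_chunks n_samples chunk_len stride drop_last out) := by unfold Spec_segment_into_fixed_chunks; infer_instance

-- ===== CLAIM (what is proved, stated in full; the proofs are below) =====
def Claim_equal_segment_into_fixed_chunks : Prop := ∀ (n_samples : Int) (chunk_len : Int) (stride : Option Int) (drop_last : Bool), Dom_segment_into_fixed_chunks n_samples chunk_len stride drop_last → Pre_segment_into_fixed_chunks n_samples chunk_len stride drop_last → Spec_segment_into_fixed_chunks n_samples chunk_len stride drop_last (segment_into_fixed_chunks n_samples chunk_len stride drop_last)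

-- ===== LEMMAS AND PROOFS =====

lemma pyRange_pos_nil (a b s : Int) (hs : 0 < s) (h : b ≤ a) :
    PySem.List.pyRange a b s = [] := by
  rw [PySem.List.pyRange_of_pos a b hs]
  simp [show ¬ a < b by omega]

lemma pyRange_pos_cons (a b s : Int) (hs : 0 < s) (h : a < b) :
    PySem.List.pyRange a b s = a :: PySem.List.pyRange (a + s) b s := by
  rw [PySem.List.pyRange_of_pos a b hs, PySem.List.pyRange_of_pos (a + s) b hs]
  by_cases h2 : a + s < b
  · have key : (b - a + s - 1) / s = (b - (a + s) + s - 1) / s + 1 := by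
      have : b - a + s - 1 = (b - (a + s) + s - 1) + 1 * s := by ring
      rw [this, Int.add_mul_ediv_right _ _ (by omega : s ≠ 0)]
    have hnn : 0 ≤ (b - (a + s) + s - 1) / s := Int.ediv_nonneg (by omega) (by omega)
    simp only [if_pos h, if_pos h2, key]
    rw [show ((b - (a + s) + s - 1) / s + 1).toNat = ((b - (a + s) + s - 1) / s).toNat + 1 by omega]
    rw [List.range_succ_eq_map]
    simp only [List.map_cons, List.map_map]
    refine List.cons_eq_cons.mpr ⟨by simp, ?_⟩
    apply List.map_congr_left
    intro k _
    simp only [Function.comp]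
    push_cast
    ring
  · have key : (b - a + s - 1) / s = 1 := by
      rw [← PySem.Int.floordiv_eq_ediv_of_pos hs]
      rw [PySem.Int.floordiv_eq_iff_of_pos hs]
      omega
    simp [if_pos h, show ¬ a + s < b by omega, key]

lemma loopA_eq (n cl st : Int) (drop : Bool) (hcl : 2 ≤ cl) (hst : 1 ≤ st) :
    ∀ (fuel : Nat) (start : Int), (n - start).toNat < fuel →
    pvLoopA n cl st drop fuel start =
      (PySem.List.pyRange start (n - cl + 1) st).map (fun s => (s, s + cl)) ++
        (if start + ((PySem.List.pyRange start (n - cl + 1) st).length : Int) * st < n ∧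
            drop = false ∧
            2 ≤ n - (start + ((PySem.List.pyRange start (n - cl + 1) st).length : Int) * st)
         then [(start + ((PySem.List.pyRange start (n - cl + 1) st).length : Int) * st, n)]
         else []) := by
  intro fuel
  induction fuel with
  | zero => intro start h; omega
  | succ fuel ih =>
    intro start h
    by_cases hlt : start < n
    · by_cases hfull : start + cl ≤ n
      · have hr : PySem.List.pyRange start (n - cl + 1) st
            = start :: PySem.List.pyRange (start + st) (n - cl + 1) st :=
          pyRange_pos_cons _ _ _ (by omega) (by omega)
        have ihh := ih (start + st) (by omega)
        simp only [pvLoopA, if_pos hlt, if_pos hfull, hr, List.map_cons, List.length_cons, ihh]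
        have harith : start + ((((PySem.List.pyRange (start + st) (n - cl + 1) st).length : Int) + 1) * st)
            = start + st + ((PySem.List.pyRange (start + st) (n - cl + 1) st).length : Int) * st := by ring
        push_cast
        rw [harith]
        simp
      · have hr : PySem.List.pyRange start (n - cl + 1) st = [] :=
          pyRange_pos_nil _ _ _ (by omega) (by omega)
        simp only [pvLoopA, if_pos hlt, if_neg hfull, hr, List.map_nil, List.length_nil,
          List.nil_append]
        simp only [Int.natCast_zero, zero_mul, add_zero]
        simp [hlt]
    · have hr : PySem.List.pyRange start (n - cl + 1) st = [] :=
        pyRange_pos_nil _ _ _ (by omega) (by omega)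
      simp only [pvLoopA, if_neg hlt, hr, List.map_nil, List.length_nil, List.nil_append]
      simp only [Int.natCast_zero, zero_mul, add_zero]
      rw [if_neg (by omega)]

lemma loopB_neg (cl st : Int) (fuel : Nat) (s : Int) (h : s < 0) :
    pvLoopB cl st fuel s = [] := by
  cases fuel with
  | zero => rfl
  | succ f => simp [pvLoopB, show ¬ 0 ≤ s by omega]

lemma loopB_eq (cl st : Int) (hst : 1 ≤ st) :
    ∀ (k fuel : Nat), k < fuel →
    pvLoopB cl st fuel ((k : Int) * st) =
      ((List.range (k + 1)).map (fun (i : Nat) => ((i : Int) * st, (i : Int) * st + cl))).reverse := by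
  intro k
  induction k with
  | zero =>
    intro fuel h
    obtain ⟨f, rfl⟩ : ∃ f, fuel = f + 1 := ⟨fuel - 1, by omega⟩
    have h0 : ((0 : Nat) : Int) * st = 0 := by simp
    rw [h0]
    simp only [pvLoopB, if_pos (le_refl (0 : Int))]
    rw [loopB_neg cl st f _ (by omega)]
    simp [List.range_one]
  | succ k ih =>
    intro fuel h
    obtain ⟨f, rfl⟩ : ∃ f, fuel = f + 1 := ⟨fuel - 1, by omega⟩
    have hpos : (0 : Int) ≤ (((k + 1 : Nat) : Int)) * st := by positivity
    have hstep : (((k + 1 : Nat) : Int)) * st - st = (k : Int) * st := by push_cast; ring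
    simp only [pvLoopB]
    rw [if_pos hpos, hstep, ih f (by omega)]
    conv_rhs => rw [List.range_succ]
    simp only [List.map_append, List.map_cons, List.map_nil, List.reverse_append,
      List.reverse_cons, List.reverse_nil, List.nil_append, List.singleton_append]

-- ===== VERDICT (by name: the statement is the Claim_ definition above) =====
theorem segment_into_fixed_chunks_spec : Claim_equal_segment_into_fixed_chunks := by
  intro n cl stride drop _ hpre
  obtain ⟨hcl, hst, hne⟩ := hpre
  unfold Spec_segment_into_fixed_chunks segment_into_fixed_chunks segment_into_fixed_chunks_alt
  simp only [if_neg (show ¬ cl < 2 by omega), if_neg (show ¬ stride.getD cl < 1 by omega)]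
  set st := stride.getD cl with hstdef
  rw [loopA_eq n cl st drop hcl hst (n.toNat + 1) 0 (by omega)]
  by_cases hfit : cl ≤ n
  · rw [if_pos hfit]
    set q : Int := PySem.Int.floordiv (n - cl) st with hq
    have hqe : q = (n - cl) / st := by
      rw [hq, PySem.Int.floordiv_eq_ediv_of_pos (by omega)]
    have hr0 : 0 ≤ (n - cl) % st := Int.emod_nonneg _ (by omega)
    have hr1 : (n - cl) % st < st := Int.emod_lt_of_pos _ (by omega)
    have hdm : (n - cl) = q * st + (n - cl) % st := by
      rw [hqe, mul_comm]; exact (Int.ediv_add_emod _ _).symm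
    have hqnn : 0 ≤ q := by nlinarith
    have hcnt : (n - cl + 1 - 0 + st - 1) / st = q + 1 := by
      rw [← PySem.Int.floordiv_eq_ediv_of_pos (show (0 : Int) < st by omega),
        PySem.Int.floordiv_eq_iff_of_pos (show (0 : Int) < st by omega)]
      exact ⟨by nlinarith, by nlinarith⟩
    obtain ⟨k, hkq⟩ : ∃ k : Nat, (k : Int) = q := ⟨q.toNat, by omega⟩
    have hrange : PySem.List.pyRange 0 (n - cl + 1) st
        = (List.range (k + 1)).map (fun (i : Nat) => (i : Int) * st) := by
      rw [PySem.List.pyRange_of_pos 0 (n - cl + 1) (show (0 : Int) < st by omega),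
        if_pos (show (0 : Int) < n - cl + 1 by omega)]
      have hcnt' : ((n - cl + 1 - 0 + st - 1) / st).toNat = k + 1 := by rw [hcnt]; omega
      rw [hcnt']
      exact List.map_congr_left fun i _ => by push_cast; ring
    have hfuel : k < ((q * st).toNat + 1) := by
      have h1 : q ≤ q * st := by
        nlinarith [mul_nonneg hqnn (show (0 : Int) ≤ st - 1 by omega)]
      omega
    have hloopB := loopB_eq cl st hst k ((q * st).toNat + 1) hfuel
    rw [hkq] at hloopB
    rw [hrange, hloopB, List.map_map, List.reverse_append, List.reverse_reverse]
    simp only [List.length_map, List.length_range]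
    have hA : (0 : Int) + ((k + 1 : Nat) : Int) * st = q * st + st := by
      push_cast
      rw [hkq]
      ring
    rw [hA]
    congr 1
    split_ifs <;> simp
  · rw [if_neg hfit]
    have hr : PySem.List.pyRange 0 (n - cl + 1) st = [] :=
      pyRange_pos_nil _ _ _ (by omega) (by omega)
    simp only [hr, List.map_nil, List.length_nil, List.nil_append,
      Int.natCast_zero, zero_mul, add_zero, sub_zero]
    split_ifs with h1 h2 h2
    · rfl
    · exact absurd ⟨h1.2.1, h1.2.2⟩ h2
    · exact absurd ⟨by omega, h2.1, h2.2⟩ h1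
    · rfl
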